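-- pv_equiv track=rewrite | github.com/santinot/Distributed-Systems | multiThread.py | reducing
-- ===== SOURCE A (Python) =====
-- def reducing(data, title):
--     dictionary = {}
--     for i in range(0, len(data)):
--         if (list(data[i].keys())[0] in dictionary):
--             dictionary[list(data[i].keys())[0]] += 1
--         else:
--             dictionary[list(data[i].keys())[0]] = 1
--     return dictionary.get(title)
-- ===== SOURCE B (Python) =====
-- def reducing(data, title):
--     count = sum(1 for d in data if list(d.keys())[0] == title)
--     return count if count else None
-- ===== Notes on version B (the rewrite author's own statement) =====
-- stated objective: simpler
-- what changed: B builds no dictionary: it counts in one pass only the entries whose first key equals title and maps a zero count to None, instead of building a full counter dict of all first keys and looking title up.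
import Mathlib
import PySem

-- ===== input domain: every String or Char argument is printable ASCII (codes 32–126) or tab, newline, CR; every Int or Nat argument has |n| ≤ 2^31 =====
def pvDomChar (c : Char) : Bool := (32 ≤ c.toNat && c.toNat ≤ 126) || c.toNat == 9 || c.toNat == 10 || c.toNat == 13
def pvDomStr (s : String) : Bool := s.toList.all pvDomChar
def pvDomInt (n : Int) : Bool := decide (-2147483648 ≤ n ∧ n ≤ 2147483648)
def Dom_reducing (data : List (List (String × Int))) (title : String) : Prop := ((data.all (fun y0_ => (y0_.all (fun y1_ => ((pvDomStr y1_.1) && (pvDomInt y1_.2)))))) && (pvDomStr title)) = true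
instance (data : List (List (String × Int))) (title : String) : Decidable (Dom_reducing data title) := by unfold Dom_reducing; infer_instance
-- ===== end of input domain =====

-- B builds no counter dict: one pass counts the first-keys equal to title, mapping 0 to none (objective: simpler).
-- ===== PORT A =====
def stepA (dict : PySem.Dict String Int) (row : List (String × Int)) : PySem.Dict String Int :=
  match PySem.List.pyGet? (PySem.Dict.mk row).keys 0 with
  | none => dict  -- IndexError (empty dict): excluded by Pre_reducing
  | some k =>
    if dict.contains k then dict.insert k (dict.getD k 0 + 1)
    else dict.insert k 1

def reducing (data : List (List (String × Int))) (title : String) : Option Int :=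
  let dict : PySem.Dict String Int :=
    (PySem.List.pyRange 0 (data.length : Int) 1).foldl
      (fun dict i => stepA dict (PySem.List.pyGetD data i [])) PySem.Dict.empty
  dict.get? title

-- ===== PORT B =====
def stepB (title : String) (c : Int) (row : List (String × Int)) : Int :=
  match PySem.List.pyGet? (PySem.Dict.mk row).keys 0 with
  | none => c  -- IndexError (empty dict): excluded by Pre_reducing
  | some k => if k == title then c + 1 else c

def reducing_alt (data : List (List (String × Int))) (title : String) : Option Int :=
  let count : Int := data.foldl (stepB title) 0
  if count = 0 then none else some count

-- ===== PRECONDITION & SPEC =====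
-- Pre_ excludes exactly the inputs containing an empty inner dict, on which both Pythons raise IndexError at list(d.keys())[0].
def Pre_reducing (data : List (List (String × Int))) (title : String) : Prop :=
  ∀ row ∈ data, row ≠ []
instance (data : List (List (String × Int))) (title : String) : Decidable (Pre_reducing data title) := by unfold Pre_reducing; infer_instance
def pvWitness_reducing : (List (List (String × Int))) × String := ([[("a", 1)], [("b", 2)], [("a", 3)]], "a")

def Spec_reducing (data : List (List (String × Int))) (title : String) (out : Option Int) : Prop := out = reducing_alt data title
instance (data : List (List (String × Int))) (title : String) (out : Option Int) : Decidable (Spec_reducing data title out) := by unfold Spec_reducing; infer_instance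

-- ===== CLAIM (what is proved, stated in full; the proofs are below) =====
def Claim_equal_reducing : Prop := ∀ (data : List (List (String × Int))) (title : String), Dom_reducing data title → Pre_reducing data title → Spec_reducing data title (reducing data title)

-- ===== LEMMAS AND PROOFS =====

-- first key of a (nonempty) row
def firstKey (row : List (String × Int)) : String := (row.headI).1

theorem stepA_eq_insert (dict : PySem.Dict String Int) (row : List (String × Int)) (h : row ≠ []) :
    stepA dict row = dict.insert (firstKey row) (dict.getD (firstKey row) 0 + 1) := by
  obtain ⟨p, rest, rfl⟩ := List.exists_cons_of_ne_nil h
  have hk : PySem.List.pyGet? (PySem.Dict.mk (p :: rest)).keys 0 = some p.1 := by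
    simp [PySem.Dict.keys_mk]
  simp only [stepA, hk, firstKey, List.headI]
  by_cases hc : dict.contains p.1
  · simp [hc]
  · have h0 : dict.getD p.1 0 = 0 :=
      PySem.Dict.getD_of_not_contains dict 0 (by simpa using hc)
    simp [hc, h0]

theorem foldA_eq_counter :
    ∀ (data : List (List (String × Int))) (d : PySem.Dict String Int),
      (∀ row ∈ data, row ≠ []) →
      data.foldl stepA d
        = (data.map firstKey).foldl (fun d k => d.insert k (d.getD k 0 + 1)) d := by
  intro data
  induction data with
  | nil => intro d _; rfl
  | cons row rest ih =>
    intro d hpre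
    have hrow : row ≠ [] := hpre row (List.mem_cons_self ..)
    simp only [List.foldl_cons, List.map_cons]
    rw [stepA_eq_insert d row hrow]
    exact ih _ (fun r hr => hpre r (List.mem_cons_of_mem _ hr))

theorem foldB_eq_count (title : String) :
    ∀ (data : List (List (String × Int))) (c : Int),
      (∀ row ∈ data, row ≠ []) →
      data.foldl (stepB title) c = c + (((data.map firstKey).count title : Nat) : Int) := by
  intro data
  induction data with
  | nil => intro c _; simp
  | cons row rest ih =>
    intro c hpre
    have hrow : row ≠ [] := hpre row (List.mem_cons_self ..)
    obtain ⟨p, rs, rfl⟩ := List.exists_cons_of_ne_nil hrow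
    have hk : PySem.List.pyGet? (PySem.Dict.mk (p :: rs)).keys 0 = some p.1 := by
      simp [PySem.Dict.keys_mk]
    have hrest := ih (if p.1 == title then c + 1 else c)
      (fun r hr => hpre r (List.mem_cons_of_mem _ hr))
    simp only [List.foldl_cons, List.map_cons, stepB, hk] at *
    rw [hrest]
    by_cases hp : p.1 = title
    · have : firstKey (p :: rs) = title := by simp [firstKey, List.headI, hp]
      simp [hp, this]
      ring
    · have : firstKey (p :: rs) ≠ title := by simp [firstKey, List.headI, hp]
      simp [hp, this]

theorem counter_get? (ks : List String) (title : String) :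
    (PySem.Dict.counter ks).get? title
      = if ((ks.count title : Nat) : Int) = 0 then none else some ((ks.count title : Nat) : Int) := by
  by_cases h : title ∈ ks
  · have hpos : 0 < ks.count title := List.count_pos_iff.mpr h
    have hc : (PySem.Dict.counter ks).contains title = true := by
      rw [PySem.Dict.contains_counter]; simpa using h
    rw [PySem.Dict.contains_eq_isSome_get?] at hc
    obtain ⟨v, hv⟩ := Option.isSome_iff_exists.mp hc
    have hgd : (PySem.Dict.counter ks).getD title 0 = v := by
      rw [PySem.Dict.getD_eq_get?_getD, hv]; rfl
    rw [PySem.Dict.getD_counter] at hgd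
    rw [hv, ← hgd, if_neg (by exact_mod_cast Nat.pos_iff_ne_zero.mp hpos)]
  · have h0 : ks.count title = 0 := List.count_eq_zero.mpr h
    have : (PySem.Dict.counter ks).get? title = none := by
      rw [PySem.Dict.get?_eq_none_iff_not_mem_keys, PySem.Dict.keys_counter]
      simpa [PySem.Set.mem_ofList] using h
    rw [this, if_pos (by exact_mod_cast h0)]

-- ===== VERDICT (by name: the statement is the Claim_ definition above) =====
theorem reducing_spec : Claim_equal_reducing := by
  intro data title _ hpre
  unfold Spec_reducing reducing reducing_alt
  rw [PySem.List.foldl_pyRange_zero_pyGetD' data [] stepA PySem.Dict.empty]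
  rw [foldA_eq_counter data PySem.Dict.empty hpre,
      PySem.Dict.foldl_insert_getD_add_one_eq_counter,
      counter_get? (data.map firstKey) title,
      foldB_eq_count title data 0 hpre]
  simp
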